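-- pv_equiv track=rewrite | github.com/GlassyFoozle/TrtDnnSplitting | src/optimization/config_evaluator.py | _compute_merge_groups
-- ===== SOURCE A (Python) =====
-- from typing import List, Optional, Tuple
--
-- def _compute_merge_groups(mask: List[int]) -> List[List[int]]:
--     """Given a boundary mask of length N-1, return groups of consecutive base-chunk indices."""
--     n_chunks = len(mask) + 1
--     groups: List[List[int]] = []
--     current: List[int] = [0]
--     for boundary_idx, bit in enumerate(mask):
--         if bit == 1:
--             groups.append(current)
--             current = [boundary_idx + 1]
--         else:
--             current.append(boundary_idx + 1)
--     groups.append(current)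
--     return groups
-- ===== SOURCE B (Python) =====
-- from typing import List
--
-- def _compute_merge_groups(mask: List[int]) -> List[List[int]]:
--     """Boundary positions first, then each group as a range between adjacent boundaries."""
--     boundaries = [0] + [i + 1 for i, b in enumerate(mask) if b == 1] + [len(mask) + 1]
--     return [list(range(a, b)) for a, b in zip(boundaries, boundaries[1:])]
-- ===== Notes on version B (the rewrite author's own statement) =====
-- stated objective: alternative
-- what changed: Replaces the incremental accumulator loop (growing 'current' and flushing it on each 1-bit) with a two-phase construction: collect cut positions, form the boundary list, then emit each group as a range between adjacent boundaries.
import Mathlib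
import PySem

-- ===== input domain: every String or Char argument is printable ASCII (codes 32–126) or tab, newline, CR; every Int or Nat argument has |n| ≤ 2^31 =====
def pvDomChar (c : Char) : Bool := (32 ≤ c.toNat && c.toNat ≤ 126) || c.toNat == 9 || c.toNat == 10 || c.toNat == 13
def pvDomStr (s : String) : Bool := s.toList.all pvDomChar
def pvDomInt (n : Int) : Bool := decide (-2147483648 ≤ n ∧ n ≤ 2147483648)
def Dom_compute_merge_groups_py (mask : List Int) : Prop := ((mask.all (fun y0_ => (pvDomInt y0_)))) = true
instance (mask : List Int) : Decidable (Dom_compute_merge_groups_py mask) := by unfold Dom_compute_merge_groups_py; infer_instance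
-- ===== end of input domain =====

-- B builds the boundary list first and emits each group as a range between adjacent
-- boundaries, instead of A's incremental accumulator loop; objective: alternative (same cost).

-- ===== PORT A =====
-- the 'for boundary_idx, bit in enumerate(mask)' loop over state (groups, current);
-- p is boundary_idx, the trailing 'groups.append(current)' is the [] case
def aGo (mask : List Int) (p : Int) (groups : List (List Int)) (cur : List Int) : List (List Int) :=
  match mask with
  | [] => groups ++ [cur]
  | bit :: rest =>
    if bit = 1 then aGo rest (p + 1) (groups ++ [cur]) [p + 1]
    else aGo rest (p + 1) groups (cur ++ [p + 1])

def compute_merge_groups_py (mask : List Int) : List (List Int) :=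
  aGo mask 0 [] [0]

-- ===== PORT B =====
def compute_merge_groups_py_alt (mask : List Int) : List (List Int) :=
  let boundaries : List Int :=
    0 :: ((PySem.List.enumerate mask 0).filterMap
            (fun q => if q.2 = 1 then some (q.1 + 1) else none)
          ++ [(mask.length : Int) + 1])
  (boundaries.zip boundaries.tail).map (fun q => PySem.List.pyRange q.1 q.2 1)

-- ===== PRECONDITION & SPEC =====
def Spec_compute_merge_groups_py (mask : List Int) (out : List (List Int)) : Prop := out = compute_merge_groups_py_alt mask
instance (mask : List Int) (out : List (List Int)) : Decidable (Spec_compute_merge_groups_py mask out) := by unfold Spec_compute_merge_groups_py; infer_instance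

-- ===== CLAIM (what is proved, stated in full; the proofs are below) =====
def Claim_equal_compute_merge_groups_py : Prop := ∀ (mask : List Int), Dom_compute_merge_groups_py mask → Spec_compute_merge_groups_py mask (compute_merge_groups_py mask)

-- ===== LEMMAS AND PROOFS =====

-- A's loop with the accumulator removed
def segs : List Int → Int → List Int → List (List Int)
  | [], _, cur => [cur]
  | bit :: rest, p, cur =>
    if bit = 1 then cur :: segs rest (p + 1) [p + 1]
    else segs rest (p + 1) (cur ++ [p + 1])

-- B's cut positions, computed structurally with offset p
def cutsF : List Int → Int → List Int
  | [], _ => []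
  | bit :: rest, p => if bit = 1 then (p + 1) :: cutsF rest (p + 1) else cutsF rest (p + 1)

-- map ranges over adjacent pairs of a boundary list
def rangesOf (bs : List Int) : List (List Int) :=
  (bs.zip bs.tail).map (fun q => PySem.List.pyRange q.1 q.2 1)

theorem aGo_eq_segs (mask : List Int) : ∀ (p : Int) (groups : List (List Int)) (cur : List Int),
    aGo mask p groups cur = groups ++ segs mask p cur := by
  induction mask with
  | nil => intro p groups cur; simp [aGo, segs]
  | cons bit rest ih =>
    intro p groups cur
    by_cases h : bit = 1 <;> simp [aGo, segs, h, ih]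

theorem filterMap_enum_eq_cutsF (mask : List Int) : ∀ (p : Int),
    (PySem.List.enumerate mask p).filterMap
      (fun q => if q.2 = 1 then some (q.1 + 1) else none) = cutsF mask p := by
  induction mask with
  | nil => intro p; simp [PySem.List.enumerate_nil, cutsF]
  | cons bit rest ih =>
    intro p
    by_cases h : bit = 1 <;>
      simp [PySem.List.enumerate_cons, h, cutsF, ih]

theorem rangesOf_cons2 (a b : Int) (t : List Int) :
    rangesOf (a :: b :: t) = PySem.List.pyRange a b 1 :: rangesOf (b :: t) := rfl

theorem segs_eq_rangesOf (mask : List Int) : ∀ (p s : Int), s ≤ p →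
    segs mask p (PySem.List.pyRange s (p + 1) 1)
      = rangesOf (s :: (cutsF mask p ++ [p + (mask.length : Int) + 1])) := by
  induction mask with
  | nil =>
    intro p s _
    simp [segs, cutsF, rangesOf]
  | cons bit rest ih =>
    intro p s hs
    by_cases h : bit = 1
    · have h1 : PySem.List.pyRange (p + 1) ((p + 1) + 1) 1 = [p + 1] :=
        PySem.List.pyRange_one_singleton (p + 1)
      have ihh := ih (p + 1) (p + 1) le_rfl
      rw [h1] at ihh
      simp only [segs, cutsF]
      rw [if_pos h, if_pos h, ihh]
      simp only [List.cons_append, List.length_cons, rangesOf_cons2]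
      push_cast
      have harith : p + ((rest.length : Int) + 1) + 1 = p + 1 + (rest.length : Int) + 1 := by ring
      rw [harith]
    · have hgrow : PySem.List.pyRange s ((p + 1) + 1) 1
          = PySem.List.pyRange s (p + 1) 1 ++ [p + 1] :=
        PySem.List.pyRange_one_succ_right (by omega)
      simp only [segs, cutsF]
      rw [if_neg h, if_neg h, ← hgrow, ih (p + 1) s (by omega)]
      simp only [List.length_cons]
      push_cast
      ring_nf

-- ===== VERDICT (by name: the statement is the Claim_ definition above) =====
theorem compute_merge_groups_py_spec : Claim_equal_compute_merge_groups_py := by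
  intro mask _
  unfold Spec_compute_merge_groups_py compute_merge_groups_py compute_merge_groups_py_alt
  rw [aGo_eq_segs, filterMap_enum_eq_cutsF]
  have h0 : ([0] : List Int) = PySem.List.pyRange 0 (0 + 1) 1 := by
    rw [PySem.List.pyRange_one_singleton]
  rw [List.nil_append, h0, segs_eq_rangesOf mask 0 0 le_rfl]
  simp [rangesOf]
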